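-- pv_equiv track=rewrite | github.com/ktan16/leetcodePython | 4_test/test.py | playSegments
-- ===== SOURCE A (Python) =====
-- def playSegments(coins):
--     # calculate initial scores
--     p1_score = 0
--     p2_score = coins.count(1) - coins.count(0)
--
--     # if p1 wins at 0 segments, return 0 segments
--     if p1_score > p2_score:
--         return 0
--
--     # loop through coins, starting at 1 to indicate index[0] = 1 play
--     for i in range(1, len(coins)):
--         # if this coin is a 1, add to p1 score and subtract from p2 score
--         if coins[i - 1] == 1:
--             p1_score += 1
--             p2_score -= 1
--         # otherwise do opposite
--         else:
--             p1_score -= 1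
--             p2_score += 1
--
--         # return this play if p1 is scoring higher than p2
--         # because it is the minimum
--         if p1_score > p2_score:
--             return i
-- ===== SOURCE B (Python) =====
-- def playSegments(coins):
--     total = coins.count(1) - coins.count(0)
--     if total < 0:
--         return 0
--     # smallest score at which player1 strictly leads (2*s > total)
--     level = total // 2 + 1
--     # positions of the 1-coins among the playable prefix coins[:-1]
--     ones = [i for i, c in enumerate(coins[:-1]) if c == 1]
--     # player1's score is a +/-1 walk, so it first reaches `level` right after
--     # playing a 1-coin; after the j-th such coin (position p) the score is
--     # 2*(j+1) - (p+1), which equals `level` exactly when p == 2*j + 1 - level.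
--     for j, p in enumerate(ones):
--         if p == 2 * j + 1 - level:
--             return p + 1
--     return None
-- ===== Notes on version B (the rewrite author's own statement) =====
-- stated objective: alternative
-- what changed: B solves it as a first-hitting-time problem: it extracts the positions of the 1-coins and returns the first position p (the j-th one) satisfying the closed index equation p == 2*j + 1 - level with level = total//2 + 1, instead of A's play-by-play simulation with two mirrored score counters compared after every play.
import Mathlib
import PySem

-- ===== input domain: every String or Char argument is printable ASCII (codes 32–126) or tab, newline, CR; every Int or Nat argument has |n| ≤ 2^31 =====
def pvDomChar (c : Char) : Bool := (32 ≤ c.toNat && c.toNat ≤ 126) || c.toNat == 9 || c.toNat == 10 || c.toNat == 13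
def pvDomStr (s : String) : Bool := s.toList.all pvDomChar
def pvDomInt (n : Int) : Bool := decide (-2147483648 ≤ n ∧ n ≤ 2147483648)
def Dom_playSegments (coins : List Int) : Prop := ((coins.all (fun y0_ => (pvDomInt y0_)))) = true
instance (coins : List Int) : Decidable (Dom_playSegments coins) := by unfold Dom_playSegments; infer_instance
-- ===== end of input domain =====

-- ===== PORT A =====
-- One honest line: B returns the first 1-coin position p (j-th one of coins[:-1]) with
-- p = 2*j + 1 - level (level = total//2 + 1), instead of A's play-by-play two-counter simulation.
def playSegmentsLoop (coins : List Int) : List Int → Int × Int → Option Int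
  | [], _ => none
  | i :: rest, (p1, p2) =>
    if PySem.List.pyGetD coins (i - 1) 0 == 1 then
      if p1 + 1 > p2 - 1 then some i else playSegmentsLoop coins rest (p1 + 1, p2 - 1)
    else
      if p1 - 1 > p2 + 1 then some i else playSegmentsLoop coins rest (p1 - 1, p2 + 1)

def playSegments (coins : List Int) : Option Int :=
  let p1_score : Int := 0
  let p2_score : Int := (PySem.List.count coins 1 : Int) - (PySem.List.count coins 0 : Int)
  if p1_score > p2_score then some 0
  else playSegmentsLoop coins (PySem.List.pyRange 1 (coins.length : Int) 1) (p1_score, p2_score)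

-- ===== PORT B =====
-- Source B's final for-loop over `ones` (j = enumerate counter, p = position)
def pvOnesScan (level : Int) : List Int → Int → Option Int
  | [], _ => none
  | p :: ps, j => if p == 2 * j + 1 - level then some (p + 1) else pvOnesScan level ps (j + 1)

def playSegments_alt (coins : List Int) : Option Int :=
  let total : Int := (PySem.List.count coins 1 : Int) - (PySem.List.count coins 0 : Int)
  if total < 0 then some 0
  else
    let level : Int := PySem.Int.floordiv total 2 + 1
    -- coins[:-1] is exactly List.dropLast
    let ones : List Int :=
      ((PySem.List.enumerate coins.dropLast 0).filter (fun ic => ic.2 == 1)).map (fun ic => ic.1)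
    pvOnesScan level ones 0

-- ===== PRECONDITION & SPEC =====
def Spec_playSegments (coins : List Int) (out : Option Int) : Prop := out = playSegments_alt coins
instance (coins : List Int) (out : Option Int) : Decidable (Spec_playSegments coins out) := by unfold Spec_playSegments; infer_instance

-- ===== CLAIM (what is proved, stated in full; the proofs are below) =====
def Claim_equal_playSegments : Prop := ∀ (coins : List Int), Dom_playSegments coins → Spec_playSegments coins (playSegments coins)

-- ===== LEMMAS AND PROOFS =====

-- proof-only helper: A's loop abstracted to a structural recursion on the coin suffix
def pvLoopS : List Int → Int → Int → Int → Option Int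
  | [], _, _, _ => none
  | [_], _, _, _ => none
  | c :: c2 :: cs, i, p1, p2 =>
    if c == 1 then
      if p1 + 1 > p2 - 1 then some i else pvLoopS (c2 :: cs) (i + 1) (p1 + 1) (p2 - 1)
    else
      if p1 - 1 > p2 + 1 then some i else pvLoopS (c2 :: cs) (i + 1) (p1 - 1) (p2 + 1)

theorem pvLoopA_eq_loopS (cs : List Int) : ∀ (j : Nat) (coins : List Int)
    (p1 p2 : Int), coins.drop j = cs →
    playSegmentsLoop coins (PySem.List.pyRange ((j : Int) + 1) (coins.length : Int) 1) (p1, p2)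
      = pvLoopS cs ((j : Int) + 1) p1 p2 := by
  induction cs with
  | nil =>
    intro j coins p1 p2 hdrop
    have hle : coins.length ≤ j := by
      by_contra h
      exact absurd hdrop (by simp [List.drop_eq_nil_iff]; omega)
    rw [PySem.List.pyRange_one_eq_nil (by exact_mod_cast Nat.le_succ_of_le hle)]
    rfl
  | cons c cs ih =>
    intro j coins p1 p2 hdrop
    have hj : j < coins.length := by
      by_contra h
      rw [List.drop_eq_nil_of_le (by omega)] at hdrop
      simp at hdrop
    have hget : PySem.List.pyGetD coins ((j : Int) + 1 - 1) 0 = c := by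
      have h0 : coins[j]? = some c := by
        have := congrArg (fun l => l[0]?) hdrop
        simpa [List.getElem?_drop] using this
      have : (j : Int) + 1 - 1 = ((j : Nat) : Int) := by ring
      rw [this, PySem.List.pyGetD_natCast]
      simp [List.getD, h0]
    cases cs with
    | nil =>
      have hlen : coins.length = j + 1 := by
        have := congrArg List.length hdrop
        simp [List.length_drop] at this
        omega
      rw [PySem.List.pyRange_one_eq_nil (by rw [hlen]; push_cast; omega)]
      rfl
    | cons c2 cs2 =>
      have hlt : (j : Int) + 1 < (coins.length : Int) := by
        have := congrArg List.length hdrop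
        simp [List.length_drop] at this
        omega
      have hdrop' : coins.drop (j + 1) = c2 :: cs2 := by
        have := congrArg List.tail hdrop
        simpa [List.tail_drop] using this
      rw [PySem.List.pyRange_one_cons hlt]
      have ih1 := ih (j + 1) coins (p1 + 1) (p2 - 1) hdrop'
      have ih2 := ih (j + 1) coins (p1 - 1) (p2 + 1) hdrop'
      push_cast at ih1 ih2
      simp only [playSegmentsLoop, hget, pvLoopS]
      by_cases hc : c = 1 <;> simp [hc] <;> split_ifs <;>
        first
          | rfl
          | (rw [show (j : Int) + 1 + 1 = (j : Int) + 2 by ring] at *; assumption)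

-- bridge: A's two-counter walk with p2 = total - p1 equals B's scan of the 1-positions,
-- under the invariants p1 = 2*j - q (walk value) and 2*p1 ≤ total (player1 not yet leading)
theorem pvLoopS_eq_onesScan (total level : Int)
    (hl : level = PySem.Int.floordiv total 2 + 1) :
    ∀ (cs : List Int) (q : Nat) (j p1 : Int), p1 = 2 * j - q → 2 * p1 ≤ total →
    pvLoopS cs ((q : Int) + 1) p1 (total - p1)
      = pvOnesScan level
          (((PySem.List.enumerate cs.dropLast (q : Int)).filter (fun ic => ic.2 == 1)).map
            (fun ic => ic.1)) j := by
  have hfl : PySem.Int.floordiv total 2 = total / 2 :=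
    PySem.Int.floordiv_eq_ediv_of_pos (by norm_num)
  rw [hfl] at hl
  intro cs
  induction cs with
  | nil => intro q j p1 _ _; rfl
  | cons c cs ih =>
    intro q j p1 hinv hle
    cases cs with
    | nil => rfl
    | cons c2 rest =>
      have hdl : (c :: c2 :: rest).dropLast = c :: (c2 :: rest).dropLast := rfl
      rw [hdl, PySem.List.enumerate_cons]
      by_cases hc : c = 1
      · have hiff : (p1 + 1 > total - p1 - 1) ↔ ((q : Int) = 2 * j + 1 - level) := by
          constructor <;> intro h <;> omega
        simp only [pvLoopS, hc, List.filter_cons, List.map_cons, pvOnesScan,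
          beq_self_eq_true, if_true, beq_iff_eq]
        by_cases ht : (q : Int) = 2 * j + 1 - level
        · rw [if_pos (by omega : p1 + 1 > total - p1 - 1), if_pos ht]
        · rw [if_neg (by omega : ¬ p1 + 1 > total - p1 - 1), if_neg ht]
          have := ih (q + 1) (j + 1) (p1 + 1) (by push_cast; omega) (by omega)
          push_cast at this
          rw [show total - p1 - 1 = total - (p1 + 1) by ring]
          exact this
      · have hfalse : ¬ (p1 - 1 > total - p1 + 1) := by omega
        simp only [pvLoopS, hc, beq_iff_eq, if_false, List.filter_cons]
        rw [if_neg hfalse]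
        have := ih (q + 1) j (p1 - 1) (by push_cast; omega) (by omega)
        push_cast at this
        rw [show total - p1 + 1 = total - (p1 - 1) by ring]
        exact this

-- ===== VERDICT (by name: the statement is the Claim_ definition above) =====
theorem playSegments_spec : Claim_equal_playSegments := by
  intro coins _
  unfold Spec_playSegments playSegments playSegments_alt
  set total : Int := (PySem.List.count coins 1 : Int) - (PySem.List.count coins 0 : Int) with htot
  by_cases h : total < 0
  · rw [if_pos (by omega : (0 : Int) > total), if_pos h]
  · rw [if_neg (by omega : ¬ (0 : Int) > total), if_neg h]
    have hA := pvLoopA_eq_loopS coins 0 coins 0 total rfl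
    norm_num at hA
    rw [hA]
    show pvLoopS coins 1 0 total
      = pvOnesScan (PySem.Int.floordiv total 2 + 1)
          (((PySem.List.enumerate coins.dropLast 0).filter (fun ic => ic.2 == 1)).map
            (fun ic => ic.1)) 0
    have hB := pvLoopS_eq_onesScan total (PySem.Int.floordiv total 2 + 1) rfl coins 0 0 0
      (by norm_num) (by omega)
    norm_num at hB
    rw [show PySem.Int.floordiv total 2 = total / 2 from
      PySem.Int.floordiv_eq_ediv_of_pos (by norm_num)]
    exact hB
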